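-- pv_equiv track=rewrite | github.com/BoothGroup/Vayesta | examples/ewf/55-combine-fci-hubbard-1d.py | fragmentation_2D
-- ===== SOURCE A (Python) =====
-- def fragmentation_2D(nsites, frag_size):
--     '''
--     Partition 2D, (nsites[0], nsites[1]) square lattice into non-overlapping fragments of (frag_size[0], frag_size[1]) (DMET baths will overlap from fragment to fragment)
--     Return list of index arrays with lattice indices belonging to fragments
--     '''
--     assert (nsites[0] % frag_size[0] == 0)
--     assert (nsites[1] % frag_size[1] == 0)
--
--     nfrag_x = int(nsites[0]/frag_size[0])
--     nfrag_y = int(nsites[1]/frag_size[1])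
--     # No. fragments in directions
--
--     fragment_indices = []
--     fragment_index = []
--
--     for nx in range(nfrag_x):
--         for ny in range(nfrag_y):
--             for i in range(frag_size[0]):
--                 for j in range(frag_size[1]):
--                     fragment_index.append([frag_size[0]*nx + i, frag_size[1]*ny + j])
--             fragment_indices.append(fragment_index)
--             fragment_index = []
--
--
--     return fragment_indices
-- ===== SOURCE B (Python) =====
-- def fragmentation_2D(nsites, frag_size):
--     '''
--     Partition 2D, (nsites[0], nsites[1]) square lattice into non-overlapping fragments of
--     (frag_size[0], frag_size[1]). Closed-form: two flat comprehensions with divmod index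
--     arithmetic instead of four nested loops.
--     '''
--     assert (nsites[0] % frag_size[0] == 0)
--     assert (nsites[1] % frag_size[1] == 0)
--
--     nfrag_x = int(nsites[0]/frag_size[0])
--     nfrag_y = int(nsites[1]/frag_size[1])
--     fsx, fsy = frag_size[0], frag_size[1]
--
--     return [[[(f // nfrag_y) * fsx + c // fsy, (f % nfrag_y) * fsy + c % fsy]
--              for c in range(fsx * fsy)]
--             for f in range(nfrag_x * nfrag_y)]
-- ===== Notes on version B (the rewrite author's own statement) =====
-- stated objective: alternative
-- what changed: Replaces the four nested per-fragment loops with two flat comprehensions over range(nfrag_x*nfrag_y) and range(fsx*fsy), recovering each coordinate pair in closed form by divmod index arithmetic.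
-- outside the precondition, e.g. on fragmentation_2D((1, -1), (-1, 1)): A returns [], B returns [[]]; on fragmentation_2D((-1, -1), (-1, -1)): A returns [[]], B returns [[[0, 0]]]
import Mathlib
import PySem

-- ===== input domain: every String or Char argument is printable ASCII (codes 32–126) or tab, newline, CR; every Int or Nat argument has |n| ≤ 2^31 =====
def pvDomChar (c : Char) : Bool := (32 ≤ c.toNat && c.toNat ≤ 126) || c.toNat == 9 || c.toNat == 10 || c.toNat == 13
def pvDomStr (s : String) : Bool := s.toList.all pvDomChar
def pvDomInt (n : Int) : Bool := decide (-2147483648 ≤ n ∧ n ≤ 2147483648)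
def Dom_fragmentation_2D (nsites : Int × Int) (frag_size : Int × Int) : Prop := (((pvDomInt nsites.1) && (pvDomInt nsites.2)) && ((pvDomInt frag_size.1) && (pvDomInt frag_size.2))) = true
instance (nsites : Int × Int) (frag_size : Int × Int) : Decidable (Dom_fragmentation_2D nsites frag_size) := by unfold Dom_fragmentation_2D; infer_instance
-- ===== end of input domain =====

-- B replaces A's four nested per-fragment loops by two flat maps over index ranges with divmod
-- index arithmetic (objective: alternative decomposition, same cost).

-- ===== PORT A =====
-- int(nsites[i]/frag_size[i]) is ported as floor division: under Pre_ the division is exact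
-- (divisibility holds and |values| ≤ 2^31 keep the float division exact), so int(a/b) = a//b.
def fragmentation_2D (nsites : Int × Int) (frag_size : Int × Int) : List (List (List Int)) :=
  let nfrag_x := PySem.Int.floordiv nsites.1 frag_size.1
  let nfrag_y := PySem.Int.floordiv nsites.2 frag_size.2
  -- state = (fragment_indices, fragment_index)
  let st := (PySem.List.pyRange 0 nfrag_x 1).foldl (fun st nx =>
    (PySem.List.pyRange 0 nfrag_y 1).foldl (fun st ny =>
      let fi := (PySem.List.pyRange 0 frag_size.1 1).foldl (fun fi i =>
        (PySem.List.pyRange 0 frag_size.2 1).foldl (fun fi j =>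
          fi ++ [[frag_size.1 * nx + i, frag_size.2 * ny + j]]) fi) st.2
      (st.1 ++ [fi], ([] : List (List Int)))) st)
    (([], []) : List (List (List Int)) × List (List Int))
  st.1

-- ===== PORT B =====
def fragmentation_2D_alt (nsites : Int × Int) (frag_size : Int × Int) : List (List (List Int)) :=
  let nfrag_x := PySem.Int.floordiv nsites.1 frag_size.1
  let nfrag_y := PySem.Int.floordiv nsites.2 frag_size.2
  let fsx := frag_size.1
  let fsy := frag_size.2
  (PySem.List.pyRange 0 (nfrag_x * nfrag_y) 1).map (fun f =>
    (PySem.List.pyRange 0 (fsx * fsy) 1).map (fun c =>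
      [PySem.Int.floordiv f nfrag_y * fsx + PySem.Int.floordiv c fsy,
       PySem.Int.mod f nfrag_y * fsy + PySem.Int.mod c fsy]))

-- ===== PRECONDITION & SPEC =====
-- Pre_ requires nonzero fragment sizes and the divisibility the asserts demand (otherwise A raises
-- ZeroDivisionError / AssertionError), and excludes one unspecifiable sign corner on which A still
-- returns: when both axes have size and fragment-size of opposite sign, or both are negative on
-- both axes, A's empty ranges yield []/empty fragments while B's closed form extrapolates to other
-- values — neither output is specified for negative lattice dimensions.
def Pre_fragmentation_2D (nsites : Int × Int) (frag_size : Int × Int) : Prop :=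
  frag_size.1 ≠ 0 ∧ frag_size.2 ≠ 0 ∧
  PySem.Int.mod nsites.1 frag_size.1 = 0 ∧ PySem.Int.mod nsites.2 frag_size.2 = 0 ∧
  ¬ ((nsites.1 * frag_size.1 < 0 ∧ nsites.2 * frag_size.2 < 0) ∨
     (0 < nsites.1 * frag_size.1 ∧ 0 < nsites.2 * frag_size.2 ∧ frag_size.1 < 0 ∧ frag_size.2 < 0))
instance (nsites : Int × Int) (frag_size : Int × Int) : Decidable (Pre_fragmentation_2D nsites frag_size) := by unfold Pre_fragmentation_2D; infer_instance

def pvWitness_fragmentation_2D : (Int × Int) × (Int × Int) := ((4, 4), (2, 2))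

def Spec_fragmentation_2D (nsites : Int × Int) (frag_size : Int × Int) (out : List (List (List Int))) : Prop := out = fragmentation_2D_alt nsites frag_size
instance (nsites : Int × Int) (frag_size : Int × Int) (out : List (List (List Int))) : Decidable (Spec_fragmentation_2D nsites frag_size out) := by unfold Spec_fragmentation_2D; infer_instance

-- ===== CLAIM (what is proved, stated in full; the proofs are below) =====
def Claim_equal_fragmentation_2D : Prop := ∀ (nsites : Int × Int) (frag_size : Int × Int), Dom_fragmentation_2D nsites frag_size → Pre_fragmentation_2D nsites frag_size → Spec_fragmentation_2D nsites frag_size (fragmentation_2D nsites frag_size)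

-- ===== LEMMAS AND PROOFS =====

/-- The cells of fragment `(nx, ny)` in A's order. -/
def pvCell (fsx fsy nx ny : Int) : List (List Int) :=
  (PySem.List.pyRange 0 fsx 1).flatMap (fun i =>
    (PySem.List.pyRange 0 fsy 1).map (fun j => [fsx * nx + i, fsy * ny + j]))

lemma pvFlatMap_congr {α β : Type} (l : List α) (f g : α → List β)
    (h : ∀ a ∈ l, f a = g a) : l.flatMap f = l.flatMap g := by
  induction l with
  | nil => rfl
  | cons x t ih =>
    simp only [List.flatMap_cons]
    rw [h x (by simp), ih (fun a ha => h a (by simp [ha]))]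

lemma pvInnerFold (fsx fsy nx ny : Int) (fi : List (List Int)) :
    (PySem.List.pyRange 0 fsx 1).foldl (fun fi i =>
      (PySem.List.pyRange 0 fsy 1).foldl (fun fi j =>
        fi ++ [[fsx * nx + i, fsy * ny + j]]) fi) fi = fi ++ pvCell fsx fsy nx ny := by
  simp only [PySem.List.foldl_append_singleton_eq_map]
  exact PySem.List.foldl_append_eq_flatMap _ _ _

lemma pvLoopY (cf : Int → List (List Int)) (m : List Int) (acc : List (List (List Int))) :
    m.foldl (fun st ny => (st.1 ++ [st.2 ++ cf ny], ([] : List (List Int)))) (acc, []) =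
      (acc ++ m.map cf, []) := by
  induction m generalizing acc with
  | nil => simp
  | cons y t ih => simp [ih]

lemma pvLoopX (F : Int → Int → List (List Int)) (nyl : List Int) (l : List Int)
    (acc : List (List (List Int))) :
    l.foldl (fun st nx =>
      nyl.foldl (fun st ny => (st.1 ++ [st.2 ++ F nx ny], ([] : List (List Int)))) st) (acc, []) =
      (acc ++ l.flatMap (fun nx => nyl.map (F nx)), []) := by
  induction l generalizing acc with
  | nil => simp
  | cons x t ih => simp [pvLoopY, ih]

/-- A computes, fragment by fragment, the row-major list of `pvCell`s. -/
lemma pvA_char (ns fs : Int × Int) :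
    fragmentation_2D ns fs =
      (PySem.List.pyRange 0 (PySem.Int.floordiv ns.1 fs.1) 1).flatMap (fun nx =>
        (PySem.List.pyRange 0 (PySem.Int.floordiv ns.2 fs.2) 1).map (fun ny =>
          pvCell fs.1 fs.2 nx ny)) := by
  unfold fragmentation_2D
  simp only [pvInnerFold]
  rw [pvLoopX]
  simp

/-- Flattening a double loop: a map over `range(k*m)` is the nested flatMap with divmod recombined. -/
lemma pvMapMul {α : Type} (g : Int → α) (k : Nat) (m : Int) (hm : 0 < m) :
    (PySem.List.pyRange 0 ((k : Int) * m) 1).map g =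
      (PySem.List.pyRange 0 (k : Int) 1).flatMap (fun a =>
        (PySem.List.pyRange 0 m 1).map (fun b => g (a * m + b))) := by
  induction k with
  | zero => simp [PySem.List.pyRange_one_eq_nil]
  | succ k ih =>
    have h1 : (0 : Int) ≤ (k : Int) * m := by positivity
    have h2 : (k : Int) * m ≤ ((k : Int) + 1) * m := by nlinarith [Int.natCast_nonneg k]
    rw [show ((k + 1 : Nat) : Int) = (k : Int) + 1 by push_cast; ring]
    rw [show ((k : Int) + 1) * m = (k : Int) * m + m by ring] at h2 ⊢
    rw [PySem.List.pyRange_one_append 0 ((k : Int) * m) ((k : Int) * m + m) h1 h2]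
    rw [PySem.List.pyRange_one_succ_right (Int.natCast_nonneg k)]
    rw [List.map_append, List.flatMap_append, ih]
    congr 1
    simp only [List.flatMap_cons, List.flatMap_nil, List.append_nil]
    rw [PySem.List.pyRange_one ((k : Int) * m) ((k : Int) * m + m), PySem.List.pyRange_one 0 m]
    simp [List.map_map, Function.comp]

lemma pvDivmod (a b m : Int) (hm : 0 < m) (hb0 : 0 ≤ b) (hb : b < m) :
    PySem.Int.floordiv (a * m + b) m = a ∧ PySem.Int.mod (a * m + b) m = b := by
  have hfd : PySem.Int.floordiv (a * m + b) m = a := by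
    rw [PySem.Int.floordiv_eq_iff_of_pos hm]
    constructor <;> nlinarith
  refine ⟨hfd, ?_⟩
  have := PySem.Int.floordiv_mul_add_mod (a * m + b) m
  rw [hfd] at this
  linarith

lemma pvFlatMapNil {α β : Type} (l : List α) : l.flatMap (fun _ => ([] : List β)) = [] := by
  induction l <;> simp [*]

-- ===== VERDICT (by name: the statement is the Claim_ definition above) =====
theorem fragmentation_2D_spec : Claim_equal_fragmentation_2D := by
  intro ns fs _hDom hPre
  obtain ⟨hf1, hf2, hm1, hm2, hbad⟩ := hPre
  unfold Spec_fragmentation_2D fragmentation_2D_alt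
  dsimp only
  rw [pvA_char]
  set nfx := PySem.Int.floordiv ns.1 fs.1 with hnfx
  set nfy := PySem.Int.floordiv ns.2 fs.2 with hnfy
  have e1 : nfx * fs.1 = ns.1 := by
    have h := PySem.Int.floordiv_mul_add_mod ns.1 fs.1
    rw [hm1] at h; rw [hnfx]; linarith
  have e2 : nfy * fs.2 = ns.2 := by
    have h := PySem.Int.floordiv_mul_add_mod ns.2 fs.2
    rw [hm2] at h; rw [hnfy]; linarith
  have sq1 : 0 < fs.1 * fs.1 := by rcases lt_or_gt_of_ne hf1 with h | h <;> nlinarith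
  have sq2 : 0 < fs.2 * fs.2 := by rcases lt_or_gt_of_ne hf2 with h | h <;> nlinarith
  have r1 : ns.1 * fs.1 = nfx * (fs.1 * fs.1) := by rw [← e1]; ring
  have r2 : ns.2 * fs.2 = nfy * (fs.2 * fs.2) := by rw [← e2]; ring
  have hd1 : 0 < nfx ↔ 0 < ns.1 * fs.1 := by
    rw [r1]; constructor <;> intro h <;> nlinarith
  have hd2 : 0 < nfy ↔ 0 < ns.2 * fs.2 := by
    rw [r2]; constructor <;> intro h <;> nlinarith
  have hd1' : nfx < 0 ↔ ns.1 * fs.1 < 0 := by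
    rw [r1]; constructor <;> intro h <;> nlinarith
  have hd2' : nfy < 0 ↔ ns.2 * fs.2 < 0 := by
    rw [r2]; constructor <;> intro h <;> nlinarith
  by_cases hP : 0 < nfx ∧ 0 < nfy
  · -- both fragment counts positive: real content
    obtain ⟨hx, hy⟩ := hP
    have hnotneg : ¬(fs.1 < 0 ∧ fs.2 < 0) := fun ⟨a, b⟩ =>
      hbad (Or.inr ⟨hd1.mp hx, hd2.mp hy, a, b⟩)
    rw [show nfx = ((nfx.toNat : Nat) : Int) from (Int.toNat_of_nonneg (le_of_lt hx)).symm]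
    rw [pvMapMul _ _ _ hy]
    apply pvFlatMap_congr
    intro a _
    apply List.map_congr_left
    intro b hb
    rw [PySem.List.mem_pyRange_one] at hb
    obtain ⟨hfd, hmd⟩ := pvDivmod a b nfy hy hb.1 hb.2
    simp only [hfd, hmd]
    by_cases hfs : 0 < fs.1 ∧ 0 < fs.2
    · obtain ⟨ha1, ha2⟩ := hfs
      rw [show fs.1 * fs.2 = ((fs.1.toNat : Nat) : Int) * fs.2 by
        rw [Int.toNat_of_nonneg (le_of_lt ha1)]]
      rw [pvMapMul _ _ _ ha2]
      rw [show ((fs.1.toNat : Nat) : Int) = fs.1 from Int.toNat_of_nonneg (le_of_lt ha1)]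
      unfold pvCell
      apply pvFlatMap_congr
      intro i _
      apply List.map_congr_left
      intro j hj
      rw [PySem.List.mem_pyRange_one] at hj
      obtain ⟨hfd', hmd'⟩ := pvDivmod i j fs.2 ha2 hj.1 hj.2
      simp only [hfd', hmd']
      ring_nf
    · -- exactly one fragment-size component negative: every fragment is empty on both sides
      have hneg : fs.1 < 0 ∨ fs.2 < 0 := by omega
      have hpos : 0 < fs.1 ∨ 0 < fs.2 := by omega
      have hple : fs.1 * fs.2 ≤ 0 := by
        rcases hpos with h | h <;> rcases hneg with h' | h' <;> nlinarith
      rw [PySem.List.pyRange_one_eq_nil hple, List.map_nil]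
      unfold pvCell
      rcases hneg with h' | h'
      · rw [PySem.List.pyRange_one_eq_nil (le_of_lt h')]; rfl
      · rw [PySem.List.pyRange_one_eq_nil (le_of_lt h')]
        simp only [List.map_nil]
        exact pvFlatMapNil _
  · -- an empty axis: both sides are the empty list
    have hnb : ¬(nfx < 0 ∧ nfy < 0) := fun ⟨a, b⟩ =>
      hbad (Or.inl ⟨hd1'.mp a, hd2'.mp b⟩)
    have hle : nfx ≤ 0 ∨ nfy ≤ 0 := by omega
    have hprod : nfx * nfy ≤ 0 := by
      rcases lt_trichotomy nfx 0 with h | h | h <;> rcases lt_trichotomy nfy 0 with h' | h' | h' <;>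
        first
          | omega
          | nlinarith
    rw [PySem.List.pyRange_one_eq_nil hprod, List.map_nil]
    rcases hle with h | h
    · rw [PySem.List.pyRange_one_eq_nil h]; rfl
    · rw [PySem.List.pyRange_one_eq_nil h]
      simp only [List.map_nil]
      exact pvFlatMapNil _
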